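-- pv_equiv track=rewrite | github.com/Biagio333/Ocr_sender | Python_Logic/Poker_BiFa_PyPokerEngine/src/utils/utils.py | build_positions_map
-- ===== SOURCE A (Python) =====
-- POSITION_NAMES_BY_PLAYER_COUNT = {
--     2: ["BTN", "BB"],
--     3: ["BTN", "SB", "BB"],
--     4: ["BTN", "SB", "BB", "UTG"],
--     5: ["BTN", "SB", "BB", "UTG", "CO"],
--     6: ["BTN", "SB", "BB", "UTG", "HJ", "CO"],
--     7: ["BTN", "SB", "BB", "UTG", "MP", "HJ", "CO"],
--     8: ["BTN", "SB", "BB", "UTG", "UTG+1", "MP", "HJ", "CO"],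
--     9: ["BTN", "SB", "BB", "UTG", "UTG+1", "MP", "LJ", "HJ", "CO"],
-- }
--
-- def position_names(num_players):
--     if num_players <= 0:
--         return []
--
--     if num_players == 1:
--         return ["BTN"]
--
--     max_supported_players = max(POSITION_NAMES_BY_PLAYER_COUNT)
--     capped_player_count = min(num_players, max_supported_players)
--     return POSITION_NAMES_BY_PLAYER_COUNT[capped_player_count][:]
--
-- def build_positions_map(active_players, button_global_index):
--     if not active_players or button_global_index not in active_players:
--         return {}
--
--     button_idx = active_players.index(button_global_index)
--     ordered_from_button = active_players[button_idx:] + active_players[:button_idx]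
--     labels = position_names(len(active_players))
--     return {
--         player_index: labels[idx]
--         for idx, player_index in enumerate(ordered_from_button)
--         if idx < len(labels)
--     }
-- ===== SOURCE B (Python) =====
-- _POSITIONS = [
--     [],
--     ["BTN"],
--     ["BTN", "BB"],
--     ["BTN", "SB", "BB"],
--     ["BTN", "SB", "BB", "UTG"],
--     ["BTN", "SB", "BB", "UTG", "CO"],
--     ["BTN", "SB", "BB", "UTG", "HJ", "CO"],
--     ["BTN", "SB", "BB", "UTG", "MP", "HJ", "CO"],
--     ["BTN", "SB", "BB", "UTG", "UTG+1", "MP", "HJ", "CO"],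
--     ["BTN", "SB", "BB", "UTG", "UTG+1", "MP", "LJ", "HJ", "CO"],
-- ]
--
-- def _assign(first, second, labels, out):
--     # consume the two segments cyclically, one label at a time
--     if not labels:
--         return
--     if not first:
--         if not second:
--             return
--         _assign(second, [], labels, out)
--         return
--     out[first[0]] = labels[0]
--     _assign(first[1:], second, labels[1:], out)
--
-- def build_positions_map(active_players, button_global_index):
--     # one scan splits the table at the button; no index(), no slicing, no rotation list
--     head, tail = [], None
--     for p in active_players:
--         if tail is None:
--             if p == button_global_index:
--                 tail = [p]
--             else:
--                 head.append(p)
--         else: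
--             tail.append(p)
--     if tail is None:
--         return {}
--     out = {}
--     _assign(tail, head, _POSITIONS[min(len(active_players), 9)], out)
--     return out
-- ===== Notes on version B (the rewrite author's own statement) =====
-- stated objective: alternative
-- what changed: B never locates the button with index()/membership and never builds a rotated concatenation: a single scan splits the list at the button into (head, tail), and a bounded recursion consumes the two segments cyclically, assigning one label per step until the labels run out.
import Mathlib
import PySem

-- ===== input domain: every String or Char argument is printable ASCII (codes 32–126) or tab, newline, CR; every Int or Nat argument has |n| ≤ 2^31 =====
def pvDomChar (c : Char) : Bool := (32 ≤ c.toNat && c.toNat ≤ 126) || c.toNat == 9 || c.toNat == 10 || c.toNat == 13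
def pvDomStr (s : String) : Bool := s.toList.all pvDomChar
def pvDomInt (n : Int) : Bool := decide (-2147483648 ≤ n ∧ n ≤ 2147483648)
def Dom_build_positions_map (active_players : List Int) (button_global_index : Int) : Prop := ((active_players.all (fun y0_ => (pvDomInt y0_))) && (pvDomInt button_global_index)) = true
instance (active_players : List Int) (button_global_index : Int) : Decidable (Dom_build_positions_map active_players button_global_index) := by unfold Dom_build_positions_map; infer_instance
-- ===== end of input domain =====

-- B replaces A's index()/slice-rotation/enumerate-filter pipeline by a single scan that splits the
-- list at the button plus a bounded recursion consuming the two segments cyclically (objective: alternative).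

-- ===== PORT A =====
def POSITION_NAMES_BY_PLAYER_COUNT : PySem.Dict Int (List String) :=
  PySem.Dict.ofList [
    (2, ["BTN", "BB"]),
    (3, ["BTN", "SB", "BB"]),
    (4, ["BTN", "SB", "BB", "UTG"]),
    (5, ["BTN", "SB", "BB", "UTG", "CO"]),
    (6, ["BTN", "SB", "BB", "UTG", "HJ", "CO"]),
    (7, ["BTN", "SB", "BB", "UTG", "MP", "HJ", "CO"]),
    (8, ["BTN", "SB", "BB", "UTG", "UTG+1", "MP", "HJ", "CO"]),
    (9, ["BTN", "SB", "BB", "UTG", "UTG+1", "MP", "LJ", "HJ", "CO"])]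

def position_names (num_players : Int) : List String :=
  if num_players ≤ 0 then []
  else if num_players = 1 then ["BTN"]
  else
    -- max(dict) iterates the keys; the dict literal is non-empty so max cannot raise
    let max_supported_players := (PySem.List.max? (PySem.Dict.keys POSITION_NAMES_BY_PLAYER_COUNT) (fun x => x)).getD 0
    let capped_player_count := min num_players max_supported_players
    -- capped key is always present (2 ≤ capped ≤ 9), so the KeyError branch is dead
    PySem.List.slice ((POSITION_NAMES_BY_PLAYER_COUNT.get? capped_player_count).getD []) none none

def build_positions_map (active_players : List Int) (button_global_index : Int) : List (Int × String) :=
  if active_players = [] ∨ active_players.contains button_global_index = false then []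
  else
    match PySem.List.index? active_players button_global_index with
    | none => []  -- unreachable: the guard established membership
    | some button_idx =>
      let ordered_from_button :=
        PySem.List.slice active_players (some (button_idx : Int)) none ++
        PySem.List.slice active_players none (some (button_idx : Int))
      let labels := position_names (active_players.length : Int)
      ((PySem.List.enumerate ordered_from_button 0).foldl
        (fun d p =>
          if p.1 < (labels.length : Int) then
            d.insert p.2 ((PySem.List.pyGet? labels p.1).getD "")
          else d)
        PySem.Dict.empty).items

-- ===== PORT B =====
def POSITIONS_alt : List (List String) := [
  [],
  ["BTN"],
  ["BTN", "BB"],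
  ["BTN", "SB", "BB"],
  ["BTN", "SB", "BB", "UTG"],
  ["BTN", "SB", "BB", "UTG", "CO"],
  ["BTN", "SB", "BB", "UTG", "HJ", "CO"],
  ["BTN", "SB", "BB", "UTG", "MP", "HJ", "CO"],
  ["BTN", "SB", "BB", "UTG", "UTG+1", "MP", "HJ", "CO"],
  ["BTN", "SB", "BB", "UTG", "UTG+1", "MP", "LJ", "HJ", "CO"]]

-- consume the two segments cyclically, one label at a time (Source B's _assign)
def assignAlt : List Int → List Int → List String → PySem.Dict Int String → PySem.Dict Int String
  | _, _, [], out => out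
  | [], [], _ :: _, out => out
  | [], s :: ss, labels, out => assignAlt (s :: ss) [] labels out
  | f :: fs, second, l :: ls, out => assignAlt fs second ls (out.insert f l)
  termination_by _first second labels _ => labels.length * 2 + min 1 second.length
  decreasing_by all_goals (simp; try omega)

def build_positions_map_alt (active_players : List Int) (button_global_index : Int) : List (Int × String) :=
  -- one scan splits the table at the button (the Python for-loop over (head, tail))
  let st := active_players.foldl
    (fun (s : List Int × Option (List Int)) p =>
      match s.2 with
      | none => if p = button_global_index then (s.1, some [p]) else (s.1 ++ [p], none)
      | some t => (s.1, some (t ++ [p])))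
    ([], none)
  match st.2 with
  | none => []
  | some tail =>
    (assignAlt tail st.1
      ((PySem.List.pyGet? POSITIONS_alt (min (active_players.length : Int) 9)).getD [])
      PySem.Dict.empty).items

-- ===== PRECONDITION & SPEC =====
def Spec_build_positions_map (active_players : List Int) (button_global_index : Int) (out : List (Int × String)) : Prop := out = build_positions_map_alt active_players button_global_index
instance (active_players : List Int) (button_global_index : Int) (out : List (Int × String)) : Decidable (Spec_build_positions_map active_players button_global_index out) := by unfold Spec_build_positions_map; infer_instance

-- ===== CLAIM (what is proved, stated in full; the proofs are below) =====
def Claim_equal_build_positions_map : Prop := ∀ (active_players : List Int) (button_global_index : Int), Dom_build_positions_map active_players button_global_index → Spec_build_positions_map active_players button_global_index (build_positions_map active_players button_global_index)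

-- ===== LEMMAS AND PROOFS =====

lemma labels_eq (n : Nat) (h1 : 1 ≤ n) :
    position_names (n : Int) = (PySem.List.pyGet? POSITIONS_alt (min (n : Int) 9)).getD [] := by
  by_cases h : n < 10
  · interval_cases n <;> decide
  · have h9 : min (n : Int) 9 = 9 := by omega
    rw [h9]
    simp only [position_names]
    rw [if_neg (by omega), if_neg (by omega)]
    have hmax : (PySem.List.max? (PySem.Dict.keys POSITION_NAMES_BY_PLAYER_COUNT) (fun x => x)).getD 0 = 9 := by decide
    rw [hmax, show min (n : Int) 9 = 9 by omega]
    decide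

lemma labels_len (n : Nat) (h1 : 1 ≤ n) :
    (position_names (n : Int)).length = min n 9 := by
  rw [labels_eq n h1]
  by_cases h : n < 10
  · interval_cases n <;> decide
  · have h9 : min (n : Int) 9 = 9 := by omega
    have h9' : min n 9 = 9 := by omega
    rw [h9, h9']
    decide

lemma foldA_eq (labels : List String) (xs : List Int) :
    ∀ (s : Nat) (d : PySem.Dict Int String),
    (PySem.List.enumerate xs (s : Int)).foldl
      (fun d p =>
        if p.1 < (labels.length : Int) then
          d.insert p.2 ((PySem.List.pyGet? labels p.1).getD "")
        else d) d
    = ((xs.take (labels.length - s)).zip (labels.drop s)).foldl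
        (fun d p => d.insert p.1 p.2) d := by
  induction xs with
  | nil => intro s d; simp [PySem.List.enumerate_nil]
  | cons x xs ih =>
    intro s d
    rw [PySem.List.enumerate_cons]
    by_cases hs : s < labels.length
    · have hget : (PySem.List.pyGet? labels (s : Int)).getD "" = labels[s] := by
        rw [PySem.List.pyGet?_natCast, List.getElem?_eq_getElem hs]; rfl
      have hsub : labels.length - s = (labels.length - (s + 1)) + 1 := by omega
      have hdrop : labels.drop s = labels[s] :: labels.drop (s + 1) := by
        rw [List.getElem_cons_drop]
      rw [List.foldl_cons]
      have hlt : ((s : Int) < (labels.length : Int)) := by exact_mod_cast hs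
      rw [if_pos hlt]
      have : ((s : Int) + 1) = ((s + 1 : Nat) : Int) := by push_cast; ring
      rw [hget, this, ih (s + 1), hsub, hdrop, List.take_succ_cons, List.zip_cons_cons,
        List.foldl_cons]
    · have hsub : labels.length - s = 0 := by omega
      have hsub' : labels.length - (s + 1) = 0 := by omega
      rw [List.foldl_cons]
      have hlt : ¬ ((s : Int) < (labels.length : Int)) := by exact_mod_cast hs
      rw [if_neg hlt]
      have : ((s : Int) + 1) = ((s + 1 : Nat) : Int) := by push_cast; ring
      rw [this, ih (s + 1), hsub, hsub']
      simp

-- once the tail has started, the scan only appends to it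
lemma split_after (btn : Int) (ys : List Int) :
    ∀ (h : List Int) (t : List Int),
    ys.foldl
      (fun (s : List Int × Option (List Int)) p =>
        match s.2 with
        | none => if p = btn then (s.1, some [p]) else (s.1 ++ [p], none)
        | some t => (s.1, some (t ++ [p])))
      (h, some t) = (h, some (t ++ ys)) := by
  induction ys with
  | nil => intro h t; simp
  | cons y ys ih => intro h t; rw [List.foldl_cons]; simp only []; rw [ih]; simp

-- the scan splits the list at its first occurrence of btn
lemma split_eq (btn : Int) (xs : List Int) :
    ∀ (h0 : List Int),
    xs.foldl
      (fun (s : List Int × Option (List Int)) p =>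
        match s.2 with
        | none => if p = btn then (s.1, some [p]) else (s.1 ++ [p], none)
        | some t => (s.1, some (t ++ [p])))
      (h0, none)
    = match PySem.List.index? xs btn with
      | none => (h0 ++ xs, none)
      | some b => (h0 ++ xs.take b, some (xs.drop b)) := by
  induction xs with
  | nil => intro h0; simp [PySem.List.index?]
  | cons x xs ih =>
    intro h0
    rw [List.foldl_cons]
    dsimp only
    by_cases hx : x = btn
    · subst hx
      rw [PySem.List.index?_cons_self, if_pos rfl, split_after]
      simp
    · rw [PySem.List.index?_cons_of_ne xs hx, if_neg hx, ih (h0 ++ [x])]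
      cases hidx : PySem.List.index? xs btn with
      | none => simp
      | some b => simp [List.take_succ_cons, List.drop_succ_cons]

lemma assignAlt_append :
    ∀ (labels : List String) (f s : List Int) (out : PySem.Dict Int String),
    assignAlt f s labels out = assignAlt (f ++ s) [] labels out := by
  intro labels
  induction labels with
  | nil => intro f s out; cases f <;> cases s <;> simp [assignAlt]
  | cons l ls ih =>
    intro f s out
    cases f with
    | cons x f' =>
      rw [show (x :: f') ++ s = x :: (f' ++ s) by simp]
      rw [assignAlt, assignAlt]
      exact ih f' s _
    | nil =>
      cases s with
      | nil => simp [assignAlt]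
      | cons y s' =>
        rw [assignAlt]
        all_goals simp

lemma assignAlt_single :
    ∀ (labels : List String) (xs : List Int) (out : PySem.Dict Int String),
    labels.length ≤ xs.length →
    assignAlt xs [] labels out
      = ((xs.take labels.length).zip labels).foldl (fun d p => d.insert p.1 p.2) out := by
  intro labels
  induction labels with
  | nil => intro xs out _; cases xs <;> simp [assignAlt]
  | cons l ls ih =>
    intro xs out hlen
    cases xs with
    | nil => simp at hlen
    | cons x xs' =>
      rw [assignAlt, ih xs' _ (by simpa using hlen)]
      simp

-- ===== VERDICT (by name: the statement is the Claim_ definition above) =====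
theorem build_positions_map_spec : Claim_equal_build_positions_map := by
  intro active btn _dom
  unfold Spec_build_positions_map
  rw [build_positions_map, build_positions_map_alt]
  simp only []
  rw [split_eq btn active []]
  cases hidx : PySem.List.index? active btn with
  | none =>
    have hnm : btn ∉ active := (PySem.List.index?_eq_none_iff _ _).mp hidx
    simp [hnm]
  | some b =>
    obtain ⟨hblt, hget, -⟩ := PySem.List.getElem_of_index?_eq_some hidx
    have hmem : btn ∈ active := hget ▸ List.getElem_mem hblt
    have hne : active ≠ [] := by rintro rfl; simp at hmem
    have hn1 : 1 ≤ active.length := by omega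
    rw [if_neg (by simp [hne, hmem])]
    simp only [List.nil_append]
    rw [labels_eq active.length hn1]
    set labels := (PySem.List.pyGet? POSITIONS_alt (min (active.length : Int) 9)).getD [] with hlab
    have hLlen : labels.length = min active.length 9 := by
      rw [hlab, ← labels_eq active.length hn1]; exact labels_len active.length hn1
    have hL : labels.length ≤ active.length := by omega
    congr 1
    have hA := foldA_eq labels
      (PySem.List.slice active (some (b : Int)) none ++ PySem.List.slice active none (some (b : Int)))
      0 PySem.Dict.empty
    simp only [Nat.cast_zero, Nat.sub_zero, List.drop_zero] at hA
    rw [hA, PySem.List.slice_from_natCast, PySem.List.slice_to_natCast]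
    rw [assignAlt_append, assignAlt_single _ _ _ (by simp; omega)]
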